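-- pv_equiv track=rewrite | github.com/ecsimsw/Movie-Recommendation | filter.py | same_series
-- ===== SOURCE A (Python) =====
-- data_hash ={
--     'adult' :0,
--     'series' : 1,
--     'budget' : 2,
--     'genres' :3,
--     'homepage' :4,
--     'id':5,
--     'imdb_id':6,
--     'original_language':7,
--     'original_titile' :8,
--     'overview' :9,
--     'popularity':10,
--     'poster':11,
--     'production_company':12,
--     'production_country':13,
--     'release':14,
--     'revenue':15,
--     'runtime':16,
--     'spoken_language':17,
--     'status':18,
--     'tagline':19,
--     'title':20,
--     'video':21,
--     'vote_ave':22,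
--     'vote_cnt':23 }
--
-- def find_value_tag(string, char_tag, pad_lan, char_last= None, data_lan =None):
--     value = []
--
--     while(True):
--         tag_index = string.find(char_tag)
--
--         if tag_index==-1:
--             return value
--
--         if data_lan != None:
--             start_index = tag_index+pad_lan+len(char_tag)
--             last_index = start_index+data_lan
--
--         else:
--             start_index = tag_index+pad_lan+len(char_tag)
--             last_index = string.find(char_last)
--
--         result_value = string[start_index:last_index]
--         value.append(result_value)
--
--         next_data_index = string.find(", {")
--
--         if next_data_index == -1:
--             break
--         string = string[next_data_index+1:]
--
--     return value
--
-- def series(line):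
--     return find_value_tag(line[data_hash['series']], 'id', 3, char_last=',')
--
-- def isExist(main_set, compare_set):
--     for feature in main_set:
--         for c in compare_set:
--             if feature==c:
--                 return True
--
--     return False
--
-- def same_series(search_line, compare_set):
--     # 같은 시리즈인지 확인한다.
--
--     search_series = series(search_line)
--
--     if search_series != []:
--         same_series_set = []
--         for line in compare_set:
--             compare_series = series(line)
--             if isExist(search_series,compare_series):
--                 same_series_set.append(line)
--         return same_series_set
--
--     else:
--         return compare_set
-- ===== SOURCE B (Python) =====
-- def _series_ids(s):
--     # one scan over the ORIGINAL string with an offset pointer b (no suffix copies):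
--     # id token of the block starting at b is s[find('id',b)+5 : find(',',b)]
--     ids = []
--     b = 0
--     while True:
--         i = s.find('id', b)
--         if i == -1:
--             return ids
--         c = s.find(',', b)
--         ids.append(s[i + 5:c] if c != -1 else s[i + 5:len(s) - 1])
--         n = s.find(', {', b)
--         if n == -1:
--             return ids
--         b = n + 1
--
--
-- def same_series(search_line, compare_set):
--     search_ids = _series_ids(search_line[1])
--     if not search_ids:
--         return compare_set
--     # inverted index: series-id token -> list of line indices holding it
--     postings = {}
--     for j, line in enumerate(compare_set):
--         for t in _series_ids(line[1]):
--             postings.setdefault(t, []).append(j)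
--     hits = set()
--     for t in search_ids:
--         hits.update(postings.get(t, ()))
--     return [line for j, line in enumerate(compare_set) if j in hits]
-- ===== Notes on version B (the rewrite author's own statement) =====
-- stated objective: alternative
-- what changed: Parsing walks the original string with an offset pointer (str.find(sub, start)) instead of A's loop that repeatedly materialises suffix copies, and the filtering is replaced by an inverted index: one pass builds a dict token -> line indices, the postings of the search tokens are unioned into a hit-index set, and the output is rebuilt from the indices - A's nested isExist scan per line disappears.
import Mathlib
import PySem

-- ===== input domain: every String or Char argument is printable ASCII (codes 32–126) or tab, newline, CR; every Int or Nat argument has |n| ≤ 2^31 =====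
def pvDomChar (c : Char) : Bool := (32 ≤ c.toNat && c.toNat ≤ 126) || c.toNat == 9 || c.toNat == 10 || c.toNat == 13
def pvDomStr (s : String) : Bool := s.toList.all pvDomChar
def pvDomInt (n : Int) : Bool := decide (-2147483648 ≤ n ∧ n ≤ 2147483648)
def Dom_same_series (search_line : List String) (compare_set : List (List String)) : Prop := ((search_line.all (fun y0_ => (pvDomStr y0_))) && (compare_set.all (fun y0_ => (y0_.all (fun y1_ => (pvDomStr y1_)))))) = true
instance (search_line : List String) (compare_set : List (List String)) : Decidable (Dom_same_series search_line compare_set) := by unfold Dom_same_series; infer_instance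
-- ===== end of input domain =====

-- B parses with an offset pointer over the original string instead of A's suffix-cutting loop,
-- and filters via an inverted index (token -> line indices, union of postings, rebuild by index)
-- instead of A's nested isExist scan per line; objective: alternative. Return value only.

-- ===== PORT A =====
-- isExist: nested for-loops with early return True = any/any
def isExist (main_set : List String) (compare_set : List String) : Bool :=
  main_set.any (fun feature => compare_set.any (fun c => feature == c))

-- the while(True) loop of find_value_tag; fuel = len(string)+1 is enough because the remaining
-- string strictly shrinks at each continued iteration (next_data_index+1 ≥ 1 chars are cut)
def findValueTagGo (charTag : String) (padLan : Int) (charLast : String) (dataLan : Option Int) :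
    Nat → String → List String → List String
  | 0, _, value => value
  | n+1, s, value =>
    let tagIndex := PySem.Str.find s charTag
    if tagIndex = -1 then value
    else
      let startIndex := tagIndex + padLan + PySem.Str.len charTag
      let lastIndex := match dataLan with
        | some dl => startIndex + dl
        | none => PySem.Str.find s charLast
      let value' := value ++ [PySem.Str.slice s (some startIndex) (some lastIndex)]
      let nextDataIndex := PySem.Str.find s ", {"
      if nextDataIndex = -1 then value'
      else findValueTagGo charTag padLan charLast dataLan n (PySem.Str.slice s (some (nextDataIndex + 1)) none) value'

-- char_last defaults to None in Python but this module always passes ','; ported as String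
def find_value_tag (string : String) (charTag : String) (padLan : Int) (charLast : String) (dataLan : Option Int) : List String :=
  findValueTagGo charTag padLan charLast dataLan (string.toList.length + 1) string []

-- series(line) = find_value_tag(line[1], 'id', 3, char_last=','); line[1] raises IndexError on
-- short lines (excluded by Pre_), the port returns [] there
def seriesA (line : List String) : List String :=
  match PySem.List.pyGet? line 1 with
  | some s => find_value_tag s "id" 3 "," none
  | none => []

def same_series (search_line : List String) (compare_set : List (List String)) : List (List String) :=
  let searchSeries := seriesA search_line
  if searchSeries ≠ [] then
    compare_set.foldl (fun acc line => if isExist searchSeries (seriesA line) then acc ++ [line] else acc) []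
  else compare_set

-- ===== PORT B =====
-- _series_ids: one scan over the original string with offset pointer b (s.find(sub, b) =
-- PySem.Str.findFrom); fuel = len(s)+1 suffices since b strictly grows and stays ≤ len(s)
def idsGoB : Nat → String → Int → List String → List String
  | 0, _, _, ids => ids
  | n+1, s, b, ids =>
    let i := PySem.Str.findFrom s "id" b none
    if i = -1 then ids
    else
      let c := PySem.Str.findFrom s "," b none
      let ids' := ids ++ [if c ≠ -1 then PySem.Str.slice s (some (i + 5)) (some c)
                          else PySem.Str.slice s (some (i + 5)) (some ((PySem.Str.len s) - 1))]
      let nn := PySem.Str.findFrom s ", {" b none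
      if nn = -1 then ids' else idsGoB n s (nn + 1) ids'

-- line[1] raises IndexError on short lines (excluded by Pre_), the port returns [] there
def seriesB (line : List String) : List String :=
  match PySem.List.pyGet? line 1 with
  | some s => idsGoB (s.toList.length + 1) s 0 []
  | none => []

def same_series_alt (search_line : List String) (compare_set : List (List String)) : List (List String) :=
  let searchIds := seriesB search_line
  if searchIds = [] then compare_set
  else
    -- postings: dict token -> list of line indices, built by setdefault(t, []).append(j)
    let postings : PySem.Dict String (List Int) :=
      (PySem.List.enumerate compare_set 0).foldl
        (fun d p => (seriesB p.2).foldl (fun d t => d.insert t (d.getD t [] ++ [p.1])) d)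
        PySem.Dict.empty
    -- hits: set of indices, union of the postings of the search tokens
    let hits : PySem.Set Int :=
      searchIds.foldl (fun h t => PySem.Set.update h (postings.getD t [])) PySem.Set.empty
    -- rebuild the output in index order
    ((PySem.List.enumerate compare_set 0).filter (fun p => PySem.Set.contains hits p.1)).map (·.2)

-- ===== PRECONDITION & SPEC =====
-- Pre_ excludes exactly the inputs where Python A raises IndexError (and B raises it too):
-- search_line shorter than 2, and, when search_line[1] contains 'id' (⇔ the search series is
-- nonempty, so the loop over compare_set runs), any compare line shorter than 2.
def Pre_same_series (search_line : List String) (compare_set : List (List String)) : Prop :=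
  2 ≤ search_line.length ∧
    (PySem.Str.isIn "id" (search_line.getD 1 "") = true → ∀ l ∈ compare_set, 2 ≤ l.length)
instance (search_line : List String) (compare_set : List (List String)) : Decidable (Pre_same_series search_line compare_set) := by unfold Pre_same_series; infer_instance

def pvWitness_same_series : List String × List (List String) :=
  (["x", "{'id': 55, 'n'"], [["y", "{'id': 55, 'm'"], ["z", "{'id': 9, 'k'"]])

def Spec_same_series (search_line : List String) (compare_set : List (List String)) (out : List (List String)) : Prop := out = same_series_alt search_line compare_set
instance (search_line : List String) (compare_set : List (List String)) (out : List (List String)) : Decidable (Spec_same_series search_line compare_set out) := by unfold Spec_same_series; infer_instance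

-- ===== CLAIM (what is proved, stated in full; the proofs are below) =====
def Claim_equal_same_series : Prop := ∀ (search_line : List String) (compare_set : List (List String)), Dom_same_series search_line compare_set → Pre_same_series search_line compare_set → Spec_same_series search_line compare_set (same_series search_line compare_set)

-- ===== LEMMAS AND PROOFS =====

-- slicing a suffix = slicing the original with shifted bounds (nonnegative stop)
lemma drop_slice_nonneg (L : List Char) (b : Nat) (a c : Int) (ha : 0 ≤ a) (hc : 0 ≤ c) :
    PySem.List.slice (L.drop b) (some a) (some c) =
      PySem.List.slice L (some ((b:Int) + a)) (some ((b:Int) + c)) := by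
  rw [PySem.List.slice_toNat _ ha hc, PySem.List.slice_toNat _ (by omega) (by omega)]
  rw [List.drop_drop]
  congr 1
  · omega
  · congr 1; omega

-- slicing a suffix with stop -1 = slicing the original up to len-1
lemma drop_slice_neg_one (L : List Char) (b : Nat) (hb : b < L.length) (a : Int) (ha : 0 ≤ a) :
    PySem.List.slice (L.drop b) (some a) (some (-1)) =
      PySem.List.slice L (some ((b:Int) + a)) (some ((L.length : Int) - 1)) := by
  simp only [PySem.List.slice, PySem.List.clampIdx, List.length_drop, List.drop_drop]
  split_ifs
  all_goals first
    | omega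
    | (congr 1 <;> first | omega | (congr 1; omega))

lemma toList_slice_from (s : String) (b : Nat) :
    (PySem.Str.slice s (some (b:Int)) none).toList = s.toList.drop b := by
  simp [PySem.Str.toList_slice, PySem.Chars.slice_eq_listSlice, PySem.List.slice_from_natCast]

-- the heart: A's suffix-cutting loop = B's offset-pointer loop
lemma go_eq (n : Nat) : ∀ (s : String) (b : Nat), b ≤ s.toList.length → ∀ (value : List String),
    findValueTagGo "id" 3 "," none n (PySem.Str.slice s (some (b:Int)) none) value
      = idsGoB n s (b:Int) value := by
  induction n with
  | zero => intro s b hb value; rfl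
  | succ n ih =>
    intro s b hb value
    have hrem := toList_slice_from s b
    simp only [findValueTagGo, idsGoB, PySem.Str.find_eq, PySem.Str.findFrom_eq, hrem,
      PySem.Chars.findFrom_natCast _ _ b hb]
    set L := s.toList with hL
    set fA := PySem.Chars.find (L.drop b) "id".toList with hfA
    set cA := PySem.Chars.find (L.drop b) ",".toList with hcA
    set nA := PySem.Chars.find (L.drop b) ", {".toList with hnA
    by_cases hf : fA = -1
    · simp [hf]
    · have hf0 : 0 ≤ fA := by
        have := PySem.Chars.neg_one_le_find (L.drop b) "id".toList
        omega
      have hfne : ¬ ((b:Int) + fA = -1) := by omega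
      simp only [if_neg hf, if_neg hfne]
      have hinfix : "id".toList <:+: L.drop b := by
        rw [hfA] at hf
        exact (PySem.Chars.find_ne_neg_one_iff _ _).1 hf
      have hlb : b + 2 ≤ L.length := by
        have := hinfix.length_le
        simp at this
        omega
      have hc0 := PySem.Chars.neg_one_le_find (L.drop b) ",".toList
      have hn0 := PySem.Chars.neg_one_le_find (L.drop b) ", {".toList
      have helem : PySem.Str.slice (PySem.Str.slice s (some (b:Int)) none)
            (some (fA + 3 + PySem.Str.len "id")) (some cA)
          = (if (if cA = -1 then (-1:Int) else (b:Int) + cA) ≠ -1 then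
               PySem.Str.slice s (some ((b:Int) + fA + 5)) (some (if cA = -1 then -1 else (b:Int) + cA))
             else PySem.Str.slice s (some ((b:Int) + fA + 5)) (some (PySem.Str.len s - 1))) := by
        apply String.toList_inj.mp
        have hlen2 : PySem.Str.len "id" = 2 := rfl
        by_cases hc : cA = -1
        · rw [if_neg (by simp [hc])]
          simp only [PySem.Str.toList_slice, PySem.Chars.slice_eq_listSlice, hrem, hc, hlen2]
          rw [show fA + 3 + 2 = fA + 5 by ring]
          rw [drop_slice_neg_one L b (by omega) (fA + 5) (by omega)]
          rw [show (b:Int) + (fA + 5) = (b:Int) + fA + 5 by ring]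
          congr 1
        · have hcge : 0 ≤ cA := by omega
          rw [if_pos (by simp only [if_neg hc]; omega)]
          simp only [PySem.Str.toList_slice, PySem.Chars.slice_eq_listSlice, hrem, hlen2,
            if_neg hc]
          rw [show fA + 3 + 2 = fA + 5 by ring]
          rw [drop_slice_nonneg L b (fA + 5) cA (by omega) hcge]
          rw [show (b:Int) + (fA + 5) = (b:Int) + fA + 5 by ring]
      rw [helem]
      by_cases hn : nA = -1
      · simp [hn]
      · have hnge : 0 ≤ nA := by omega
        simp only [if_neg hn, if_neg (show ¬ ((b:Int) + nA = -1) by omega)]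
        have hinf2 : ", {".toList <+: (L.drop b).drop nA.toNat := by
          have hs := PySem.Chars.find_spec (s := L.drop b) (sub := ", {".toList)
            (by rw [← hnA]; omega)
          rw [← hnA] at hs
          exact hs.1
        have hlen3 : nA.toNat + 3 ≤ L.length - b := by
          have := hinf2.length_le
          simp at this
          omega
        have harg : PySem.Str.slice (PySem.Str.slice s (some (b:Int)) none) (some (nA + 1)) none
            = PySem.Str.slice s (some ((b + nA.toNat + 1 : Nat) : Int)) none := by
          apply String.toList_inj.mp
          rw [toList_slice_from]
          simp only [PySem.Str.toList_slice, PySem.Chars.slice_eq_listSlice, hrem]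
          rw [PySem.List.slice_from _ (by omega), List.drop_drop]
          congr 1
          omega
        rw [harg, ih s (b + nA.toNat + 1)
          (by have hLlen : L.length = s.toList.length := rfl; omega)]
        rw [show ((b + nA.toNat + 1 : Nat) : Int) = (b:Int) + nA + 1 by
          push_cast [Int.toNat_of_nonneg hnge]; ring]

lemma series_eq (line : List String) : seriesA line = seriesB line := by
  unfold seriesA seriesB
  cases h : PySem.List.pyGet? line 1 with
  | none => rfl
  | some s =>
    unfold find_value_tag
    have h0 : PySem.Str.slice s (some ((0 : Nat) : Int)) none = s := by
      apply String.toList_inj.mp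
      rw [toList_slice_from]
      simp
    calc findValueTagGo "id" 3 "," none (s.toList.length + 1) s []
        = findValueTagGo "id" 3 "," none (s.toList.length + 1)
            (PySem.Str.slice s (some ((0 : Nat) : Int)) none) [] := by rw [h0]
      _ = idsGoB (s.toList.length + 1) s ((0 : Nat) : Int) [] := go_eq _ s 0 (by omega) []
      _ = idsGoB (s.toList.length + 1) s 0 [] := by norm_num

-- inner postings fold (one line, index j): membership in a bucket
lemma mem_getD_inner (ts : List String) (d : PySem.Dict String (List Int)) (j x : Int) (t : String) :
    x ∈ (ts.foldl (fun d t => d.insert t (d.getD t [] ++ [j])) d).getD t [] ↔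
      x ∈ d.getD t [] ∨ (t ∈ ts ∧ x = j) := by
  induction ts generalizing d with
  | nil => simp
  | cons a ts ih =>
    rw [List.foldl_cons, ih, PySem.Dict.getD_insert]
    by_cases h : t = a
    · subst h; simp; tauto
    · simp [h]

-- outer postings fold over the enumerated lines
lemma mem_getD_outer (cs : List (List String)) : ∀ (k : Int) (d : PySem.Dict String (List Int))
    (x : Int) (t : String),
    x ∈ ((PySem.List.enumerate cs k).foldl
          (fun d p => (seriesB p.2).foldl (fun d t => d.insert t (d.getD t [] ++ [p.1])) d)
          d).getD t [] ↔
      x ∈ d.getD t [] ∨ ∃ p ∈ PySem.List.enumerate cs k, p.1 = x ∧ t ∈ seriesB p.2 := by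
  induction cs with
  | nil => intro k d x t; simp [PySem.List.enumerate_nil]
  | cons line cs ih =>
    intro k d x t
    rw [PySem.List.enumerate_cons, List.foldl_cons, ih, mem_getD_inner]
    simp only [List.mem_cons]
    constructor
    · rintro ((h | ⟨ht, hx⟩) | ⟨p, hp, h1, h2⟩)
      · exact Or.inl h
      · exact Or.inr ⟨(k, line), Or.inl rfl, hx.symm, ht⟩
      · exact Or.inr ⟨p, Or.inr hp, h1, h2⟩
    · rintro (h | ⟨p, (rfl | hp), h1, h2⟩)
      · exact Or.inl (Or.inl h)
      · exact Or.inl (Or.inr ⟨h2, h1.symm⟩)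
      · exact Or.inr ⟨p, hp, h1, h2⟩

lemma mem_update_set (h : PySem.Set Int) (l : List Int) (x : Int) :
    x ∈ PySem.Set.update h l ↔ x ∈ h ∨ x ∈ l := by
  induction l generalizing h with
  | nil => simp [PySem.Set.update]
  | cons a l ih =>
    show x ∈ PySem.Set.update (PySem.Set.add h a) l ↔ _
    rw [ih, PySem.Set.mem_add]
    simp
    tauto

lemma mem_hits (S : List String) (g : String → List Int) : ∀ (h : PySem.Set Int) (x : Int),
    x ∈ S.foldl (fun h t => PySem.Set.update h (g t)) h ↔ x ∈ h ∨ ∃ t ∈ S, x ∈ g t := by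
  induction S with
  | nil => intro h x; simp
  | cons a S ih =>
    intro h x
    rw [List.foldl_cons, ih, mem_update_set]
    simp
    tauto

-- rebuilding from hit indices = filtering the lines, when the index predicate matches per line
lemma filter_enumerate_map (f : Int → Bool) (q : List String → Bool) :
    ∀ (cs : List (List String)) (k : Int),
      (∀ (j : Nat), (h : j < cs.length) → f (k + j) = q cs[j]) →
      ((PySem.List.enumerate cs k).filter (fun p => f p.1)).map (·.2) = cs.filter q := by
  intro cs
  induction cs with
  | nil => intro k _; simp [PySem.List.enumerate_nil]
  | cons x cs ih =>
    intro k hk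
    rw [PySem.List.enumerate_cons]
    have h0 : f k = q x := by simpa using hk 0 (by simp)
    have hrest := ih (k + 1) (fun j hj => by
      have := hk (j + 1) (by simpa using hj)
      simpa [add_assoc, add_comm, add_left_comm] using this)
    by_cases hq : q x = true
    · simp only [List.filter_cons, List.filter_cons, h0, hq]
      simp [hrest]
    · simp only [List.filter_cons, h0]
      simp [hrest, hq]

lemma isExist_iff (S T : List String) : isExist S T = true ↔ ∃ t ∈ S, t ∈ T := by
  simp [isExist, List.any_eq_true]

lemma main_filter_eq (S : List String) (cs : List (List String)) :
    cs.foldl (fun acc line => if isExist S (seriesA line) then acc ++ [line] else acc) [] =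
    ((PySem.List.enumerate cs 0).filter (fun p => PySem.Set.contains
      (S.foldl (fun h t => PySem.Set.update h
        (((PySem.List.enumerate cs 0).foldl
          (fun d p => (seriesB p.2).foldl (fun d t => d.insert t (d.getD t [] ++ [p.1])) d)
          PySem.Dict.empty).getD t [])) PySem.Set.empty) p.1)).map (·.2) := by
  have hfold := PySem.List.foldl_append_if
    (fun line => isExist S (seriesA line)) (id : List String → List String) cs []
  simp only [id, List.map_id, List.nil_append] at hfold
  rw [hfold]
  rw [← filter_enumerate_map _ (fun line => isExist S (seriesA line)) cs 0 ?_]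
  intro j hj
  rw [Bool.eq_iff_iff, PySem.Set.contains_eq_listContains, List.contains_iff_mem,
    mem_hits, isExist_iff]
  constructor
  · rintro (h | ⟨t, ht, hmem⟩)
    · simp [PySem.Set.empty] at h
    · rw [mem_getD_outer] at hmem
      rcases hmem with h | ⟨p, hp, h1, h2⟩
      · simp [PySem.Dict.getD, PySem.Dict.get?, PySem.Dict.empty] at h
      · rw [PySem.List.mem_enumerate_iff] at hp
        obtain ⟨m, hm, rfl⟩ := hp
        have : m = j := by
          have := h1
          simp at this
          omega
        subst this
        exact ⟨t, ht, by rwa [series_eq]⟩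
  · rintro ⟨t, ht, hmem⟩
    refine Or.inr ⟨t, ht, ?_⟩
    rw [mem_getD_outer]
    refine Or.inr ⟨((j:Int), cs[j]), ?_, by simp, by rwa [series_eq] at hmem⟩
    rw [PySem.List.mem_enumerate_iff]
    exact ⟨j, hj, by simp⟩

-- ===== VERDICT (by name: the statement is the Claim_ definition above) =====
theorem same_series_spec : Claim_equal_same_series := by
  intro search_line compare_set _ _
  unfold Spec_same_series same_series same_series_alt
  rw [series_eq search_line]
  by_cases hnil : seriesB search_line = []
  · simp [hnil]
  · rw [if_pos hnil, if_neg hnil]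
    exact main_filter_eq _ _
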